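-- pv_equiv track=rewrite | github.com/complexhhs/Baekjoon_solution | 10250.py | check_room
-- ===== SOURCE A (Python) =====
-- def check_room(h,w,n):
-- 	cnt_w = 1
-- 	cnt_h = 0
-- 	while True:
-- 		cnt_h += 1
-- 		if cnt_h > h:
-- 			cnt_h = 1
-- 			cnt_w += 1
-- 		if (cnt_w-1)*h+cnt_h == n:
-- 			break
-- 	if cnt_w//10 == 0:
-- 		return str(cnt_h)+'0'+str(cnt_w)
-- 	else:
-- 		return str(cnt_h)+str(cnt_w)
-- ===== SOURCE B (Python) =====
-- def check_room(h, w, n):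
--     f = (n - 1) % h + 1
--     r = (n - 1) // h + 1
--     return str(f) + ('0' + str(r) if r < 10 else str(r))
-- ===== Notes on version B (the rewrite author's own statement) =====
-- stated objective: faster
-- what changed: Replaces the one-by-one counting loop with a closed-form floor-division/modulo computation of floor and room number.
-- outside the precondition, e.g. on check_room(0, 0, 1): A returns '102', B raises ZeroDivisionError; on check_room(1, 0, 0): A does not finish within the time limit, B returns '100'
import Mathlib
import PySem

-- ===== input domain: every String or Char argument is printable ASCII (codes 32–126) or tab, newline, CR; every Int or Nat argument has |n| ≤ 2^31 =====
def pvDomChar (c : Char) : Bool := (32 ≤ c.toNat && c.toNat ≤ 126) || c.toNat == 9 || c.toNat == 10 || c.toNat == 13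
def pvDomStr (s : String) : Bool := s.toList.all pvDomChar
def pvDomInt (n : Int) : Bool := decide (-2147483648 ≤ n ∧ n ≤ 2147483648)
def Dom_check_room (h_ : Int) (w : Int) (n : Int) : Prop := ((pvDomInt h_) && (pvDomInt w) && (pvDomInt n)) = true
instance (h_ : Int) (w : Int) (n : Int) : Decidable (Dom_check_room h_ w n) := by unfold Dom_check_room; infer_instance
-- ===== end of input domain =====

-- B replaces A's one-by-one counting loop with a closed-form floor-division/modulo computation (asymptotically faster).


-- ===== PORT A =====
-- A's `while True` loop, step for step, as fuel recursion over the same state (cnt_w, cnt_h).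
-- Fuel n.natAbs + 2 is exact wherever the Python loop terminates: for h_ ≥ 1 the checked value
-- starts at 0 and rises by 1 per iteration (break within n iterations, proved below); for h_ ≤ 0
-- it moves by |h_| per iteration, so a break, if any, also fires within |n| + 2 iterations.
def check_room_loop (h_ n : Int) : Nat → Int × Int → Int × Int
  | 0, s => s
  | fuel + 1, (cnt_w, cnt_h) =>
    let cnt_h := cnt_h + 1
    let (cnt_w, cnt_h) := if cnt_h > h_ then (cnt_w + 1, (1 : Int)) else (cnt_w, cnt_h)
    if (cnt_w - 1) * h_ + cnt_h = n then (cnt_w, cnt_h)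
    else check_room_loop h_ n fuel (cnt_w, cnt_h)

def check_room (h_ : Int) (w : Int) (n : Int) : String :=
  let s := check_room_loop h_ n (n.natAbs + 2) (1, 0)
  let cnt_w := s.1
  let cnt_h := s.2
  if PySem.Int.floordiv cnt_w 10 = 0 then
    PySem.Int.toStr cnt_h ++ "0" ++ PySem.Int.toStr cnt_w
  else
    PySem.Int.toStr cnt_h ++ PySem.Int.toStr cnt_w

-- ===== PORT B =====
def check_room_alt (h_ : Int) (w : Int) (n : Int) : String :=
  let f := PySem.Int.mod (n - 1) h_ + 1
  let r := PySem.Int.floordiv (n - 1) h_ + 1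
  PySem.Int.toStr f ++ (if r < 10 then "0" ++ PySem.Int.toStr r else PySem.Int.toStr r)

-- ===== PRECONDITION & SPEC =====
-- Pre_ excludes h_ ≤ 0 and n ≤ 0: there A's loop diverges on almost every input (and on the stray
-- points where it does return, e.g. h_ = 0, n = 1, B's division by zero raises), and B raises on h_ = 0.
def Pre_check_room (h_ : Int) (w : Int) (n : Int) : Prop := 1 ≤ h_ ∧ 1 ≤ n
instance (h_ : Int) (w : Int) (n : Int) : Decidable (Pre_check_room h_ w n) := by unfold Pre_check_room; infer_instance
def pvWitness_check_room : Int × Int × Int := (6, 12, 10)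

def Spec_check_room (h_ : Int) (w : Int) (n : Int) (out : String) : Prop := out = check_room_alt h_ w n
instance (h_ : Int) (w : Int) (n : Int) (out : String) : Decidable (Spec_check_room h_ w n out) := by unfold Spec_check_room; infer_instance

-- ===== CLAIM (what is proved, stated in full; the proofs are below) =====
def Claim_equal_check_room : Prop := ∀ (h_ : Int) (w : Int) (n : Int), Dom_check_room h_ w n → Pre_check_room h_ w n → Spec_check_room h_ w n (check_room h_ w n)

-- ===== LEMMAS AND PROOFS =====

-- canonical loop state when the checked value is v >= 1
def canonState (h_ v : Int) : Int × Int :=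
  (PySem.Int.floordiv (v - 1) h_ + 1, PySem.Int.mod (v - 1) h_ + 1)

-- loop state before the iteration whose checked value will be v + 1
def stateOf (h_ v : Int) : Int × Int :=
  if v = 0 then ((1 : Int), (0 : Int)) else canonState h_ v

theorem canon_value (h_ v : Int) :
    ((canonState h_ v).1 - 1) * h_ + (canonState h_ v).2 = v := by
  have h := PySem.Int.floordiv_mul_add_mod (v - 1) h_
  simp only [canonState]
  linarith

theorem state_step (h_ v : Int) (hh : 1 ≤ h_) (hv : 0 ≤ v) :
    (if (stateOf h_ v).2 + 1 > h_ then ((stateOf h_ v).1 + 1, (1 : Int))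
     else ((stateOf h_ v).1, (stateOf h_ v).2 + 1)) = canonState h_ (v + 1) := by
  have hsimp : v + 1 - 1 = v := by ring
  by_cases h0 : v = 0
  · subst h0
    have hfd : PySem.Int.floordiv 0 h_ = 0 :=
      (PySem.Int.floordiv_eq_iff_of_pos (by omega)).mpr ⟨by linarith, by linarith⟩
    have hmd : PySem.Int.mod 0 h_ = 0 := by
      have := PySem.Int.floordiv_mul_add_mod 0 h_
      rw [hfd] at this; linarith
    simp only [stateOf, canonState]
    norm_num [hfd, hmd]
    omega
  · have hv1 : 1 ≤ v := by omega
    simp only [stateOf, if_neg h0, canonState, hsimp]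
    have hqr := PySem.Int.floordiv_mul_add_mod (v - 1) h_
    have hr0 : 0 ≤ PySem.Int.mod (v - 1) h_ := PySem.Int.mod_nonneg _ (by omega)
    have hrh : PySem.Int.mod (v - 1) h_ < h_ := PySem.Int.mod_lt _ (by omega)
    split_ifs with hgt
    · -- row full: mod (v-1) h_ = h_ - 1, so v = (q+1) * h_
      have hfd : PySem.Int.floordiv v h_ = PySem.Int.floordiv (v - 1) h_ + 1 :=
        (PySem.Int.floordiv_eq_iff_of_pos (by omega)).mpr ⟨by nlinarith, by nlinarith⟩
      have hmd : PySem.Int.mod v h_ = 0 := by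
        have := PySem.Int.floordiv_mul_add_mod v h_
        rw [hfd] at this; nlinarith
      rw [hfd, hmd]; norm_num
    · -- within the row
      have hfd : PySem.Int.floordiv v h_ = PySem.Int.floordiv (v - 1) h_ :=
        (PySem.Int.floordiv_eq_iff_of_pos (by omega)).mpr ⟨by nlinarith, by nlinarith⟩
      have hmd : PySem.Int.mod v h_ = PySem.Int.mod (v - 1) h_ + 1 := by
        have := PySem.Int.floordiv_mul_add_mod v h_
        rw [hfd] at this; nlinarith
      rw [hfd, hmd]

theorem loop_reaches (h_ n : Int) (hh : 1 ≤ h_) (hn : 1 ≤ n) :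
    ∀ (fuel : Nat) (v : Int), 0 ≤ v → v < n → n ≤ v + fuel →
      check_room_loop h_ n fuel (stateOf h_ v) = canonState h_ n := by
  intro fuel
  induction fuel with
  | zero => intro v _ h1 h2; simp at h2; omega
  | succ k ih =>
    intro v hv0 hvn hnf
    have hstep := state_step h_ v hh hv0
    rcases hs : stateOf h_ v with ⟨cw, ch⟩
    rw [hs] at hstep
    simp only at hstep
    simp only [check_room_loop]
    rw [hstep, canon_value h_ (v + 1)]
    by_cases hdone : v + 1 = n
    · rw [if_pos hdone, hdone]
    · rw [if_neg hdone]
      have hrec := ih (v + 1) (by omega) (by omega) (by push_cast at hnf ⊢; omega)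
      rw [show stateOf h_ (v + 1) = canonState h_ (v + 1) from by
        simp only [stateOf]; rw [if_neg (by omega)]] at hrec
      simpa using hrec

-- ===== VERDICT (by name: the statement is the Claim_ definition above) =====
theorem check_room_spec : Claim_equal_check_room := by
  intro h_ w n _ hpre
  obtain ⟨hh, hn⟩ := hpre
  unfold Spec_check_room check_room check_room_alt
  have hloop : check_room_loop h_ n (n.natAbs + 2) (1, 0) = canonState h_ n := by
    have h := loop_reaches h_ n hh hn (n.natAbs + 2) 0 le_rfl (by omega) (by omega)
    simpa [stateOf] using h
  rw [hloop]
  simp only [canonState]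
  have hq0 : 0 ≤ PySem.Int.floordiv (n - 1) h_ := by
    have h1 := PySem.Int.floordiv_mul_add_mod (n - 1) h_
    have h2 := PySem.Int.mod_nonneg (n - 1) (b := h_) (by omega)
    have h3 := PySem.Int.mod_lt (n - 1) (b := h_) (by omega)
    nlinarith
  by_cases hlt : PySem.Int.floordiv (n - 1) h_ + 1 < 10
  · rw [if_pos ((PySem.Int.floordiv_eq_iff_of_pos (by omega)).mpr ⟨by omega, by omega⟩),
        if_pos hlt]
    simp [String.append_assoc]
  · rw [if_neg (fun hc => hlt (by
        have := (PySem.Int.floordiv_eq_iff_of_pos (a := PySem.Int.floordiv (n - 1) h_ + 1)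
          (b := (10 : Int)) (q := 0) (by omega)).mp hc
        omega)), if_neg hlt]
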